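-- pv_equiv track=rewrite | github.com/MKeravis/Assembleur-ADN | assembleur 2.0.py | grow1
-- ===== SOURCE A (Python) =====
-- def grow1 (population) :
--     for i in range (0,len(population), 1) :
--         if population[i] > 1:
--             population[i] -= 1
--         else :
--             population.append(9)
--             population[i] = 7
--     return(population)
-- ===== SOURCE B (Python) =====
-- def grow1(population):
--     # Divide and conquer over index ranges: go(lo, hi) returns the transformed
--     # segment population[lo:hi] together with its number of resets; merges
--     # concatenate. One final assembly appends the 9s (A's appended 9s are never
--     # revisited by its fixed-length loop, so they all end up at the back).
--     def go(lo, hi):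
--         if hi <= lo:
--             return ([], 0)
--         if hi - lo == 1:
--             x = population[lo]
--             if x > 1:
--                 return ([x - 1], 0)
--             return ([7], 1)
--         mid = (lo + hi) // 2
--         left, nl = go(lo, mid)
--         right, nr = go(mid, hi)
--         return (left + right, nl + nr)
--     body, nines = go(0, len(population))
--     population[:] = body + [9] * nines
--     return population
-- ===== Notes on version B (the rewrite author's own statement) =====
-- stated objective: alternative
-- what changed: Replaces A's linear index loop that mutates entries and appends 9s inside the body by a divide-and-conquer recursion over index ranges whose leaves transform one element and report a reset flag, merges concatenate, and a single final assembly appends the 9s.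
import Mathlib
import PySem

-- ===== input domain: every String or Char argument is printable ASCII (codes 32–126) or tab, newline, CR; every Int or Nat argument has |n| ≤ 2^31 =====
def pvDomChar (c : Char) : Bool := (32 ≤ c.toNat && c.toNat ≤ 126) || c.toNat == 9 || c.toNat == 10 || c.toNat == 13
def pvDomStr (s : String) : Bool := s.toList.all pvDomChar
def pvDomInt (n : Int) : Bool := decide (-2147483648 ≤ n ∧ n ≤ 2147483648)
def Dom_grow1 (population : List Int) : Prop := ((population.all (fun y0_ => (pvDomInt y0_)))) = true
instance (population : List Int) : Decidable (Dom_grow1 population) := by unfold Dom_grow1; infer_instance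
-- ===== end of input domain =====

-- B replaces A's linear index loop (mutate entry / append 9 inside the body) by a
-- divide-and-conquer recursion over index ranges, with one final assembly of the 9s;
-- objective: alternative. Both Pythons mutate `population` in place; the equivalence
-- proved is about the return value.

-- ===== PORT A =====
-- A's for-loop over range(0, len(population), 1): index recursion up to the ORIGINAL length n,
-- mutating the list state (set / append) exactly as the Python body does.
-- The `none` branch of pyGet? is unreachable: the list only grows, so i < n ≤ length throughout.
def grow1Loop (pop : List Int) (i n : Nat) : List Int :=
  if _h : i < n then
    match PySem.List.pyGet? pop (Int.ofNat i) with
    | some v =>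
      if v > 1 then grow1Loop (pop.set i (v - 1)) (i + 1) n
      else grow1Loop ((pop ++ [9]).set i 7) (i + 1) n
    | none => pop
  else pop
termination_by n - i

def grow1 (population : List Int) : List Int :=
  grow1Loop population 0 population.length

-- ===== PORT B =====
-- Source B's go(lo, hi): divide and conquer on the index range; leaves read population[lo].
-- The `none` branch of pyGet? is unreachable under lo < hi ≤ length.
def grow1Go (population : List Int) (lo hi : Nat) : List Int × Nat :=
  if hi ≤ lo then ([], 0)
  else if hi - lo = 1 then
    match PySem.List.pyGet? population (Int.ofNat lo) with
    | some x => if x > 1 then ([x - 1], 0) else ([7], 1)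
    | none => ([], 0)
  else
    let mid := (lo + hi) / 2  -- Python's (lo+hi)//2: exact here, both operands are nonnegative Nats
    let l := grow1Go population lo mid
    let r := grow1Go population mid hi
    (l.1 ++ r.1, l.2 + r.2)
termination_by hi - lo
decreasing_by all_goals omega

def grow1_alt (population : List Int) : List Int :=
  let p := grow1Go population 0 population.length
  p.1 ++ List.replicate p.2 9

-- ===== PRECONDITION & SPEC =====
def Spec_grow1 (population : List Int) (out : List Int) : Prop := out = grow1_alt population
instance (population : List Int) (out : List Int) : Decidable (Spec_grow1 population out) := by unfold Spec_grow1; infer_instance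

-- ===== CLAIM (what is proved, stated in full; the proofs are below) =====
def Claim_equal_grow1 : Prop := ∀ (population : List Int), Dom_grow1 population → Spec_grow1 population (grow1 population)

-- ===== LEMMAS AND PROOFS =====

-- take/drop of a list written as prefix ++ pivot :: suffix, with the prefix of length i
theorem seg_take (T D : List Int) (v : Int) (i : Nat) (hT : T.length = i) :
    (T ++ v :: D).take (i + 1) = T ++ [v] := by
  subst hT; simp [List.take_append]

theorem seg_drop1 (T D : List Int) (v : Int) (i : Nat) (hT : T.length = i) :
    (T ++ v :: D).drop (i + 1) = D := by
  subst hT; simp [List.drop_append]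

theorem seg_drop (T D : List Int) (v : Int) (i n : Nat) (hT : T.length = i) (h : i + 1 ≤ n) :
    (T ++ v :: D).drop n = D.drop (n - (i + 1)) := by
  subst hT
  rw [List.drop_append, List.drop_eq_nil_of_le (by omega)]
  have hn : n - T.length = (n - (T.length + 1)) + 1 := by omega
  rw [hn, List.drop_succ_cons]
  simp

-- A-side loop invariant: with i ≤ n ≤ pop.length, the loop transforms the segment [i, n),
-- keeps the tail pop.drop n, and appends one 9 per reset element of the segment.
theorem grow1Loop_eq (k : Nat) : ∀ (pop : List Int) (i n : Nat), n - i = k → i ≤ n → n ≤ pop.length →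
    grow1Loop pop i n =
      pop.take i ++ ((pop.drop i).take (n - i)).map (fun x => if x > 1 then x - 1 else 7)
        ++ pop.drop n
        ++ List.replicate (((pop.drop i).take (n - i)).countP (fun x => decide (x ≤ 1))) 9 := by
  induction k with
  | zero =>
    intro pop i n hk hle hlen
    have hin : i = n := by omega
    subst hin
    rw [grow1Loop]
    simp
  | succ k ih =>
    intro pop i n hk hle hlen
    have hi : i < n := by omega
    have hip : i < pop.length := by omega
    rw [grow1Loop]
    have hget : PySem.List.pyGet? pop (Int.ofNat i) = some pop[i] := by
      simp [pysem, hip]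
    simp only [hi, dite_true, hget]
    have hT : (pop.take i).length = i := by simp; omega
    have hmid : (pop.drop i).take (n - i)
        = pop[i] :: (pop.drop (i + 1)).take (n - (i + 1)) := by
      rw [List.drop_eq_getElem_cons hip]
      have h1 : n - i = (n - (i + 1)) + 1 := by omega
      rw [h1, List.take_succ_cons]
    have hdropn : pop.drop n = (pop.drop (i + 1)).drop (n - (i + 1)) := by
      rw [List.drop_drop]
      congr 1; omega
    have hDlen : n - (i + 1) ≤ (pop.drop (i + 1)).length := by simp; omega
    by_cases hv : pop[i] > 1
    · -- decrement branch: pop' = pop.set i (pop[i]-1) = T ++ (pop[i]-1) :: D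
      simp only [hv, if_true]
      rw [List.set_eq_take_cons_drop _ hip,
          ih _ (i + 1) n (by omega) (by omega) (by simp; omega),
          seg_take _ _ _ _ hT, seg_drop1 _ _ _ _ hT, seg_drop _ _ _ _ _ hT (by omega),
          hmid, ← hdropn]
      simp [hv, not_le.mpr hv, List.append_assoc]
    · -- reset branch: pop' = (pop ++ [9]).set i 7 = T ++ 7 :: (D ++ [9])
      simp only [hv, if_false]
      have hip9 : i < (pop ++ [9]).length := by simp; omega
      have hset9 : (pop ++ [9]).set i 7 = pop.take i ++ 7 :: (pop.drop (i + 1) ++ [9]) := by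
        rw [List.set_eq_take_cons_drop _ hip9,
            List.take_append_of_le_length (by omega),
            List.drop_append_of_le_length (by omega)]
      rw [hset9, ih _ (i + 1) n (by omega) (by omega) (by simp; omega),
          seg_take _ _ _ _ hT, seg_drop1 _ _ _ _ hT, seg_drop _ _ _ _ _ hT (by omega),
          List.take_append_of_le_length hDlen,
          List.drop_append_of_le_length hDlen,
          hmid, ← hdropn]
      simp [hv, not_lt.mp hv, List.append_assoc, List.replicate_succ]

-- B-side divide-and-conquer invariant: go on [lo, hi) returns the transformed segment and
-- its reset count.
theorem grow1Go_eq (k : Nat) : ∀ (pop : List Int) (lo hi : Nat), hi - lo = k → hi ≤ pop.length →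
    grow1Go pop lo hi =
      (((pop.drop lo).take (hi - lo)).map (fun x => if x > 1 then x - 1 else 7),
       ((pop.drop lo).take (hi - lo)).countP (fun x => decide (x ≤ 1))) := by
  induction k using Nat.strong_induction_on with
  | _ k ih =>
    intro pop lo hi hk hlen
    rw [grow1Go]
    by_cases h0 : hi ≤ lo
    · have : hi - lo = 0 := by omega
      simp [h0, this]
    · simp only [h0, if_false]
      by_cases h1 : hi - lo = 1
      · have hlop : lo < pop.length := by omega
        have hget : PySem.List.pyGet? pop (Int.ofNat lo) = some pop[lo] := by
          simp [pysem, hlop]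
        have hseg : (pop.drop lo).take 1 = [pop[lo]] := by
          rw [List.drop_eq_getElem_cons hlop, List.take_succ_cons, List.take_zero]
        simp only [h1, if_true, hget]
        rw [hseg]
        by_cases hv : pop[lo] > 1
        · simp [hv, not_le.mpr hv]
        · simp [hv, not_lt.mp hv]
      · simp only [h1, if_false]
        have hlt : lo < hi := by omega
        have hmid1 : lo < (lo + hi) / 2 := by omega
        have hmid2 : (lo + hi) / 2 < hi := by omega
        rw [ih ((lo + hi) / 2 - lo) (by omega) pop lo ((lo + hi) / 2) rfl (by omega),
            ih (hi - (lo + hi) / 2) (by omega) pop ((lo + hi) / 2) hi rfl hlen]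
        have hsplit : (pop.drop lo).take (hi - lo)
            = (pop.drop lo).take ((lo + hi) / 2 - lo)
              ++ (pop.drop ((lo + hi) / 2)).take (hi - (lo + hi) / 2) := by
          have hdd : pop.drop ((lo + hi) / 2) = (pop.drop lo).drop ((lo + hi) / 2 - lo) := by
            rw [List.drop_drop]; congr 1; omega
          rw [hdd, ← List.take_add]
          congr 1; omega
        rw [hsplit]
        simp [List.countP_append]

-- ===== VERDICT (by name: the statement is the Claim_ definition above) =====
theorem grow1_spec : Claim_equal_grow1 := by
  intro population _
  unfold Spec_grow1 grow1 grow1_alt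
  rw [grow1Loop_eq (population.length) population 0 population.length rfl (Nat.zero_le _) le_rfl,
      grow1Go_eq (population.length) population 0 population.length rfl le_rfl]
  simp
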